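-- pv_equiv track=rewrite | github.com/brettcs/dtrx | dtrx/dtrx.py | border_line_file_index
-- ===== SOURCE A (Python) =====
-- def border_line_file_index(line):
--     last_space_index = None
--     for index, char in enumerate(line):
--         if char == " ":
--             last_space_index = index
--         elif char != "-":
--             return None
--     if last_space_index is None:
--         return None
--     return last_space_index + 1
-- ===== SOURCE B (Python) =====
-- def border_line_file_index(line):
--     # Valid border lines contain only spaces and dashes; the answer is the
--     # position after the last space, i.e. the length after stripping the
--     # trailing run of dashes.
--     if set(line) <= {" ", "-"}:
--         stripped = line.rstrip("-")
--         if stripped: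
--             return len(stripped)
--     return None
-- ===== Notes on version B (the rewrite author's own statement) =====
-- stated objective: simpler
-- what changed: Instead of a forward loop tracking the last space index with early return, B validates the character set via set inclusion and computes the answer arithmetically as the length of the line with its trailing dash run stripped (rstrip), with no index tracking at all.
import Mathlib
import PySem

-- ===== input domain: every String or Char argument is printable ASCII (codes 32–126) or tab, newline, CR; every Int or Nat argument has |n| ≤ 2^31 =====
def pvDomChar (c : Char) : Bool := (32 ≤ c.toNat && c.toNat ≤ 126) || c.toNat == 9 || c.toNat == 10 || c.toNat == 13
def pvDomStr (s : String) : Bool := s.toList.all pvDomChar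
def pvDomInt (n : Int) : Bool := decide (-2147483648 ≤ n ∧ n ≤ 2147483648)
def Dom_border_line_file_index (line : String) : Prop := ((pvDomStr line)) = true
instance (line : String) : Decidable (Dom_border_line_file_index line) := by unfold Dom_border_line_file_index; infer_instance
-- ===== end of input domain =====

-- B validates the character set with a set-inclusion test and returns the length of the line
-- with its trailing dash run stripped, instead of A's forward loop tracking the last space index;
-- objective: simpler.


-- ===== PORT A =====
-- forward loop: running last_space_index, early return None on an invalid char
def aLoop : List Char → Int → Option Int → Option Int
  | [], _, last => match last with
    | none => none
    | some i => some (i + 1)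
  | c :: rest, idx, last =>
    if c = ' ' then aLoop rest (idx + 1) (some idx)
    else if c ≠ '-' then none
    else aLoop rest (idx + 1) last

def border_line_file_index (line : String) : Option Int :=
  aLoop line.toList 0 none

-- ===== PORT B =====
-- line.rstrip("-"): drop the trailing run of '-' characters (exact: rstrip with an explicit
-- chars argument removes exactly the maximal trailing run of those characters)
def rstripDashes (cs : List Char) : List Char :=
  (cs.reverse.dropWhile (fun c => c = '-')).reverse

def border_line_file_index_alt (line : String) : Option Int :=
  if PySem.Set.issubset (PySem.Set.ofList line.toList) (PySem.Set.ofList [' ', '-']) then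
    let stripped := rstripDashes line.toList
    if stripped ≠ [] then some (stripped.length : Int) else none
  else none

-- ===== PRECONDITION & SPEC =====
def Spec_border_line_file_index (line : String) (out : Option Int) : Prop := out = border_line_file_index_alt line
instance (line : String) (out : Option Int) : Decidable (Spec_border_line_file_index line out) := by unfold Spec_border_line_file_index; infer_instance

-- ===== CLAIM =====
def Claim_equal_border_line_file_index : Prop := ∀ (line : String), Dom_border_line_file_index line → Spec_border_line_file_index line (border_line_file_index line)

-- ===== LEMMAS AND PROOFS =====

theorem issubset_eq_all (cs : List Char) :
    PySem.Set.issubset (PySem.Set.ofList cs) (PySem.Set.ofList [' ', '-'])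
      = cs.all (fun c => c = ' ' || c = '-') := by
  by_cases h : cs.all (fun c => c = ' ' || c = '-') = true
  · rw [h]
    rw [PySem.Set.issubset_iff]
    intro x hx
    have hx' := (PySem.Set.mem_ofList _ _).mp hx
    simp only [List.all_eq_true, Bool.or_eq_true, decide_eq_true_eq] at h
    rcases h x hx' with h1 | h1 <;> simp [PySem.Set.mem_ofList, h1]
  · have h' : (cs.all (fun c => c = ' ' || c = '-')) = false := by
      cases hb : cs.all (fun c => c = ' ' || c = '-') <;> simp [hb] at h ⊢
    rw [h']
    by_contra hs
    rw [Bool.not_eq_false] at hs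
    apply h
    rw [PySem.Set.issubset_iff] at hs
    simp only [List.all_eq_true, Bool.or_eq_true, decide_eq_true_eq]
    intro x hx
    have := hs x ((PySem.Set.mem_ofList _ _).mpr hx)
    rw [PySem.Set.mem_ofList] at this
    simpa using this

theorem rstripDashes_cons (c : Char) (rest : List Char) :
    rstripDashes (c :: rest) =
      if rstripDashes rest = [] then (if c = '-' then [] else [c])
      else c :: rstripDashes rest := by
  unfold rstripDashes
  rw [List.reverse_cons, List.dropWhile_append]
  by_cases h0 : (rest.reverse.dropWhile (fun c => c = '-')) = []
  · simp only [h0, List.isEmpty_nil, if_true, if_true]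
    by_cases hc : c = '-' <;> simp [List.dropWhile, hc]
  · have : ¬ ((rest.reverse.dropWhile (fun c => c = '-')).reverse = []) := by
      simpa [List.reverse_eq_nil_iff] using h0
    simp [List.isEmpty_iff, h0, this]

theorem aLoop_invalid (cs : List Char) (idx : Int) (last : Option Int)
    (h : ¬ (cs.all (fun c => c = ' ' || c = '-')) = true) : aLoop cs idx last = none := by
  induction cs generalizing idx last with
  | nil => simp at h
  | cons c rest ih =>
    simp only [List.all_cons, Bool.and_eq_true, Bool.or_eq_true, decide_eq_true_eq] at h
    simp only [aLoop]
    by_cases hc : c = ' '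
    · rw [if_pos hc]
      apply ih; intro hr; exact h ⟨Or.inl hc, hr⟩
    · rw [if_neg hc]
      by_cases hd : c = '-'
      · rw [if_neg (by simp [hd])]
        apply ih; intro hr; exact h ⟨Or.inr hd, hr⟩
      · simp [hd]

theorem aLoop_valid (cs : List Char) (idx : Int) (last : Option Int)
    (h : (cs.all (fun c => c = ' ' || c = '-')) = true) :
    aLoop cs idx last =
      (if rstripDashes cs = [] then (match last with | none => none | some i => some (i + 1))
       else some (idx + (rstripDashes cs).length)) := by
  induction cs generalizing idx last with
  | nil => simp [aLoop, rstripDashes]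
  | cons c rest ih =>
    simp only [List.all_cons, Bool.and_eq_true, Bool.or_eq_true, decide_eq_true_eq] at h
    obtain ⟨hc, hr⟩ := h
    rw [rstripDashes_cons]
    simp only [aLoop]
    rcases hc with hc | hc
    · subst hc
      rw [if_pos rfl, ih _ _ hr]
      have hns : ¬ ((' ' : Char) = '-') := by decide
      by_cases h0 : rstripDashes rest = []
      · simp [h0, hns]
      · simp only [h0, if_false]
        have : ¬ ((' ' : Char) :: rstripDashes rest = []) := by simp
        rw [if_neg this]
        simp only [List.length_cons]
        congr 1
        push_cast
        ring
    · subst hc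
      have hns : ¬ (('-' : Char) = ' ') := by decide
      rw [if_neg hns]
      simp only [ne_eq, not_true_eq_false, if_false]
      rw [ih _ _ hr]
      by_cases h0 : rstripDashes rest = []
      · simp [h0]
      · simp only [h0, if_false]
        have : ¬ (('-' : Char) :: rstripDashes rest = []) := by simp
        rw [if_neg this]
        simp only [List.length_cons]
        congr 1
        push_cast
        ring

-- ===== VERDICT =====
theorem border_line_file_index_spec : Claim_equal_border_line_file_index := by
  intro line _
  unfold Spec_border_line_file_index border_line_file_index border_line_file_index_alt
  rw [issubset_eq_all]
  by_cases hv : (line.toList.all (fun c => c = ' ' || c = '-')) = true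
  · rw [if_pos hv, aLoop_valid _ _ _ hv]
    by_cases h0 : rstripDashes line.toList = []
    · simp [h0]
    · simp [h0]
  · rw [aLoop_invalid _ _ _ hv, if_neg hv]
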